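-- pv_equiv track=rewrite | github.com/oht505/OSU_24FALL_CS514_Algorithm | Wk6_7/Q3_open_a set of coffee shops.py | open_coffee_shops
-- ===== SOURCE A (Python) =====
-- def open_coffee_shops(d, p, k):
--     n = len(d)
--     dp = [0] * n
--
--     def find_prev_idx(idx):
--         left, right = 0, idx-1
--         while left <= right:
--             mid = (left + right)//2
--             if d[idx] - d[mid] >= k:
--                 left = mid+1
--             else:
--                 right = mid-1
--         return right
--
--     dp[0] = p[0]
--     for i in range(1, n):
--         prev_idx = find_prev_idx(i)
--         if prev_idx != -1:
--             dp[i] = max(dp[i-1], dp[prev_idx] + p[i])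
--         else:
--             dp[i] = max(dp[i-1], p[i])
--
--     return dp[-1]
-- ===== SOURCE B (Python) =====
-- def open_coffee_shops(d, p, k):
--     # Two-pointer O(n): since d is sorted, the last index j with d[i]-d[j] >= k
--     # is nondecreasing in i, so one monotone pointer replaces per-i binary search.
--     n = len(d)
--     best = p[0]
--     bests = [best]          # bests[i] == dp[i] of the DP (running maxima)
--     j = 0                   # number of valid predecessor indices for current i
--     for i in range(1, n):
--         while j < i and d[i] - d[j] >= k:
--             j += 1
--         cand = (bests[j - 1] if j > 0 else 0) + p[i]
--         best = max(best, cand)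
--         bests.append(best)
--     return best
-- ===== Notes on version B (the rewrite author's own statement) =====
-- stated objective: faster
-- what changed: Replaces the per-index binary search for the furthest compatible predecessor with a single monotone two-pointer that advances amortized O(1) per index, and the dp array with a running maximum plus append-only list.
-- outside the precondition, e.g. on open_coffee_shops([-2, 2, -3], [3, 2, 4], 1): A returns 5, B returns 7
import Mathlib
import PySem

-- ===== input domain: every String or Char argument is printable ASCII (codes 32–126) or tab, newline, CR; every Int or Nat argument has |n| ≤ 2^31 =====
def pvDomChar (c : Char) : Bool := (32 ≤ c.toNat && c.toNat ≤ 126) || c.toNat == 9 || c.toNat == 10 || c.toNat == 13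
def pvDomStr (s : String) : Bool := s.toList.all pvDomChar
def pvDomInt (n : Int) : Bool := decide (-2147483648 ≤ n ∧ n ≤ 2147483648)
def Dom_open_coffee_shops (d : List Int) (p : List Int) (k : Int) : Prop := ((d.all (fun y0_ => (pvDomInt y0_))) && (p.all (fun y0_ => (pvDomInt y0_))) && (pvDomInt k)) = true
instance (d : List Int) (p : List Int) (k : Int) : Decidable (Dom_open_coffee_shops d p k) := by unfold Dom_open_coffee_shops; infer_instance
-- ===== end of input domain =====

-- B replaces A's per-index binary search by a single monotone two-pointer (amortized O(1) per index)
-- and the preallocated dp array by a running maximum with an append-only list.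

-- ===== PORT A =====
-- the inner `find_prev_idx` while-loop (binary search); indexing d[idx], d[mid] is at
-- nonnegative in-range indices on every admitted input, where pyGetD _ _ 0 is exact
def pvFindPrevLoop (d : List Int) (k : Int) (idx : Int) : Nat → Int → Int → Int
  | 0, _, right => right
  | fuel + 1, left, right =>
    if left ≤ right then
      if PySem.List.pyGetD d idx 0 - PySem.List.pyGetD d (PySem.Int.floordiv (left + right) 2) 0 ≥ k then
        pvFindPrevLoop d k idx fuel (PySem.Int.floordiv (left + right) 2 + 1) right
      else
        pvFindPrevLoop d k idx fuel left (PySem.Int.floordiv (left + right) 2 - 1)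
    else right

-- the fuel idx.toNat only bounds the while-loop (the interval right+1-left starts at idx and
-- strictly shrinks each pass, so the loop always exits via left > right before fuel runs out)
def pvFindPrev (d : List Int) (k : Int) (idx : Int) : Int :=
  pvFindPrevLoop d k idx idx.toNat 0 (idx - 1)

def open_coffee_shops (d : List Int) (p : List Int) (k : Int) : Int :=
  let n : Int := d.length
  let dp0 : List Int := List.replicate d.length 0
  -- dp[0] = p[0]  (assignment at the nonnegative in-range index 0)
  let dp1 := dp0.set 0 (PySem.List.pyGetD p 0 0)
  let dp2 := (PySem.List.pyRange 1 n 1).foldl (fun dp i =>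
    let prev := pvFindPrev d k i
    if prev ≠ -1 then
      dp.set i.toNat (max (PySem.List.pyGetD dp (i - 1) 0) (PySem.List.pyGetD dp prev 0 + PySem.List.pyGetD p i 0))
    else
      dp.set i.toNat (max (PySem.List.pyGetD dp (i - 1) 0) (PySem.List.pyGetD p i 0))) dp1
  PySem.List.pyGetD dp2 (-1) 0

-- ===== PORT B =====
-- the inner `while j < i and d[i] - d[j] >= k: j += 1` loop
def pvAdvanceLoop (d : List Int) (k : Int) (i : Int) : Nat → Int → Int
  | 0, j => j
  | fuel + 1, j =>
    if j < i ∧ PySem.List.pyGetD d i 0 - PySem.List.pyGetD d j 0 ≥ k then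
      pvAdvanceLoop d k i fuel (j + 1)
    else j

-- the fuel (i - j).toNat only bounds the while-loop (j increases towards i each pass, so the
-- loop always exits via its own condition before fuel runs out)
def pvAdvance (d : List Int) (k : Int) (i : Int) (j : Int) : Int :=
  pvAdvanceLoop d k i (i - j).toNat j

def open_coffee_shops_alt (d : List Int) (p : List Int) (k : Int) : Int :=
  let s := (PySem.List.pyRange 1 (d.length : Int) 1).foldl
    (fun (s : Int × List Int × Int) i =>
      let j := pvAdvance d k i s.2.2
      let cand := (if j > 0 then PySem.List.pyGetD s.2.1 (j - 1) 0 else 0) + PySem.List.pyGetD p i 0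
      let best := max s.1 cand
      (best, s.2.1 ++ [best], j))
    (PySem.List.pyGetD p 0 0, [PySem.List.pyGetD p 0 0], 0)
  s.1

-- ===== PRECONDITION & SPEC =====
-- Pre_ restricts to the task's natural domain: a nonempty, sorted list of shop positions
-- with a profit for every shop. On d = [] or len(p) < len(d) the Python A raises IndexError;
-- on unsorted d (excluded, A returns there) A's binary search assumes sortedness and its
-- value is an artefact of the search path, which B does not reproduce.
def Pre_open_coffee_shops (d : List Int) (p : List Int) (k : Int) : Prop :=
  d ≠ [] ∧ d.length ≤ p.length ∧ d.Pairwise (· ≤ ·)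
instance (d : List Int) (p : List Int) (k : Int) : Decidable (Pre_open_coffee_shops d p k) := by
  unfold Pre_open_coffee_shops; infer_instance

def pvWitness_open_coffee_shops : List Int × List Int × Int := ([0, 3, 5, 9], [3, 5, 2, 7], 4)

def Spec_open_coffee_shops (d : List Int) (p : List Int) (k : Int) (out : Int) : Prop := out = open_coffee_shops_alt d p k
instance (d : List Int) (p : List Int) (k : Int) (out : Int) : Decidable (Spec_open_coffee_shops d p k out) := by unfold Spec_open_coffee_shops; infer_instance

-- ===== CLAIM (what is proved, stated in full; the proofs are below) =====
def Claim_equal_open_coffee_shops : Prop := ∀ (d : List Int) (p : List Int) (k : Int), Dom_open_coffee_shops d p k → Pre_open_coffee_shops d p k → Spec_open_coffee_shops d p k (open_coffee_shops d p k)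

-- ===== LEMMAS AND PROOFS =====

-- number of valid predecessors of index i: j < i with d[i] - d[j] ≥ k
def pvCnt (d : List Int) (k : Int) (i : Nat) : Nat :=
  (List.range i).countP (fun j => decide (d.getD i 0 - d.getD j 0 ≥ k))

lemma pvCnt_le (d : List Int) (k : Int) (i : Nat) : pvCnt d k i ≤ i := by
  have h := List.countP_le_length (p := fun j => decide (d.getD i 0 - d.getD j 0 ≥ k)) (l := List.range i)
  simpa [pvCnt] using h

-- the reference DP value: pvF i = dp[i] of A's recurrence
def pvF (d : List Int) (p : List Int) (k : Int) : Nat → Int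
  | 0 => p.getD 0 0
  | (i+1) => max (pvF d p k i)
      ((if 0 < pvCnt d k (i+1) then pvF d p k (pvCnt d k (i+1) - 1) else 0) + p.getD (i+1) 0)
termination_by i => i
decreasing_by
  · omega
  · have := pvCnt_le d k (i+1); omega

lemma pv_getD_mono (d : List Int) (hs : d.Pairwise (· ≤ ·)) {a b : Nat} (hab : a ≤ b)
    (hb : b < d.length) : d.getD a 0 ≤ d.getD b 0 := by
  rcases Nat.lt_or_ge a b with h | h
  · have := (List.pairwise_iff_getElem.mp hs) a b (by omega) hb h
    rw [List.getD_eq_getElem d 0 (by omega), List.getD_eq_getElem d 0 hb]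
    exact this
  · have : a = b := by omega
    subst this; rfl

lemma pvCnt_spec (d : List Int) (k : Int) (hs : d.Pairwise (· ≤ ·)) (i : Nat) (hi : i < d.length) :
    ∀ j : Nat, j < i → (d.getD i 0 - d.getD j 0 ≥ k ↔ j < pvCnt d k i) := by
  intro j hj
  set P : Nat → Bool := fun j => decide (d.getD i 0 - d.getD j 0 ≥ k) with hP
  have hdc : ∀ a b : Nat, a ≤ b → b < i → P b = true → P a = true := by
    intro a b hab hb hPb
    simp only [P, decide_eq_true_eq] at hPb ⊢
    have := pv_getD_mono d hs hab (by omega : b < d.length)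
    omega
  have key : ∀ m, m ≤ i → (List.range m).filter P = List.range ((List.range m).countP P) := by
    intro m
    induction m with
    | zero => intro _; simp
    | succ mm ih =>
      intro hm
      rw [List.range_succ, List.filter_append, List.countP_append]
      by_cases hPm : P mm = true
      · have hall : ∀ x ∈ List.range mm, P x = true := by
          intro x hx
          exact hdc x mm (by have := List.mem_range.mp hx; omega) (by omega) hPm
        rw [List.filter_eq_self.mpr hall, List.countP_eq_length.mpr hall]
        simp [hPm, List.range_succ]
      · have hPm' : P mm = false := by simpa using hPm
        simp [hPm', ih (by omega)]
  have hcnt : pvCnt d k i = (List.range i).countP P := by rw [hP]; rfl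
  constructor
  · intro hp
    have hmem : j ∈ (List.range i).filter P := by
      rw [List.mem_filter]
      refine ⟨List.mem_range.mpr hj, ?_⟩
      simp only [hP, decide_eq_true_eq]
      exact hp
    rw [key i le_rfl] at hmem
    rw [hcnt]
    exact List.mem_range.mp hmem
  · intro hp
    rw [hcnt] at hp
    have hmem := List.mem_range.mpr hp
    rw [← key i le_rfl] at hmem
    have hPj := (List.mem_filter.mp hmem).2
    simp only [hP, decide_eq_true_eq] at hPj
    exact hPj

lemma pvCnt_mono (d : List Int) (k : Int) (hs : d.Pairwise (· ≤ ·)) (i : Nat)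
    (hi : i + 1 < d.length) : pvCnt d k i ≤ pvCnt d k (i + 1) := by
  unfold pvCnt
  have h1 : (List.range i).countP (fun j => decide (d.getD i 0 - d.getD j 0 ≥ k))
      ≤ (List.range i).countP (fun j => decide (d.getD (i+1) 0 - d.getD j 0 ≥ k)) := by
    apply List.countP_mono_left
    intro a _ hp
    simp only [decide_eq_true_eq] at hp ⊢
    have := pv_getD_mono d hs (show i ≤ i + 1 by omega) hi
    omega
  have h2 : (List.range (i+1)).countP (fun j => decide (d.getD (i+1) 0 - d.getD j 0 ≥ k))
      = (List.range i).countP (fun j => decide (d.getD (i+1) 0 - d.getD j 0 ≥ k))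
        + (List.countP (fun j => decide (d.getD (i+1) 0 - d.getD j 0 ≥ k)) [i]) := by
    rw [List.range_succ, List.countP_append]
  omega

-- Int-cast form of pvCnt_spec, about the indexing the ports use
lemma pv_hq (d : List Int) (k : Int) (hs : d.Pairwise (· ≤ ·)) (i : Nat) (hi : i < d.length) :
    ∀ j : Int, 0 ≤ j → j < (i : Int) →
      (PySem.List.pyGetD d (i : Int) 0 - PySem.List.pyGetD d j 0 ≥ k ↔ j < (pvCnt d k i : Int)) := by
  intro j h0 hj
  obtain ⟨jn, rfl⟩ := Int.eq_ofNat_of_zero_le h0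
  rw [PySem.List.pyGetD_natCast, PySem.List.pyGetD_natCast]
  have h := pvCnt_spec d k hs i hi jn (by exact_mod_cast hj)
  constructor
  · intro hp; exact_mod_cast h.mp hp
  · intro hp; exact h.mpr (by exact_mod_cast hp)

lemma pvFindPrev_run (d : List Int) (k : Int) (i : Int) (c : Int)
    (hq : ∀ j : Int, 0 ≤ j → j < i →
      (PySem.List.pyGetD d i 0 - PySem.List.pyGetD d j 0 ≥ k ↔ j < c)) :
    ∀ fuel : Nat, ∀ left right : Int, (right + 1 - left).toNat ≤ fuel →
      0 ≤ left → right ≤ i - 1 → left ≤ right + 1 → left ≤ c → c ≤ right + 1 →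
      pvFindPrevLoop d k i fuel left right = c - 1 := by
  intro fuel
  induction fuel with
  | zero =>
    intro left right hf h0 h1 h2 h3 h4
    simp only [pvFindPrevLoop]
    omega
  | succ f ih =>
    intro left right hf h0 h1 h2 h3 h4
    simp only [pvFindPrevLoop]
    by_cases hlr : left ≤ right
    · rw [if_pos hlr]
      have hm := PySem.Int.floordiv_two_mid_bounds hlr
      by_cases hp : PySem.List.pyGetD d i 0 - PySem.List.pyGetD d (PySem.Int.floordiv (left + right) 2) 0 ≥ k
      · rw [if_pos hp]
        have hc := (hq _ (by omega) (by omega)).mp hp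
        exact ih _ _ (by omega) (by omega) h1 (by omega) (by omega) h4
      · rw [if_neg hp]
        have hc : ¬ (PySem.Int.floordiv (left + right) 2 < c) :=
          fun hlt => hp ((hq _ (by omega) (by omega)).mpr hlt)
        exact ih _ _ (by omega) h0 (by omega) (by omega) h3 (by omega)
    · rw [if_neg hlr]
      omega

lemma pvAdvance_run (d : List Int) (k : Int) (i : Int) (c : Int)
    (hq : ∀ j : Int, 0 ≤ j → j < i →
      (PySem.List.pyGetD d i 0 - PySem.List.pyGetD d j 0 ≥ k ↔ j < c))
    (hci : c ≤ i) :
    ∀ fuel : Nat, ∀ j : Int, (i - j).toNat ≤ fuel → 0 ≤ j → j ≤ c →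
      pvAdvanceLoop d k i fuel j = c := by
  intro fuel
  induction fuel with
  | zero =>
    intro j hf h0 hjc
    simp only [pvAdvanceLoop]
    omega
  | succ f ih =>
    intro j hf h0 hjc
    simp only [pvAdvanceLoop]
    by_cases hjlt : j < c
    · have hji : j < i := by omega
      rw [if_pos ⟨hji, (hq j h0 hji).mpr hjlt⟩]
      exact ih (j+1) (by omega) (by omega) (by omega)
    · rw [if_neg]
      · omega
      · rintro ⟨hji, hp⟩
        exact hjlt ((hq j h0 hji).mp hp)

lemma map_range_getD (f : Nat → Int) (n t : Nat) (h : t < n) :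
    ((List.range n).map f).getD t 0 = f t := by
  rw [List.getD_eq_getElem _ 0 (by simpa using h)]
  simp

lemma pvF_succ (d : List Int) (p : List Int) (k : Int) (m : Nat) (hm : 1 ≤ m) :
    pvF d p k m = max (pvF d p k (m - 1))
      ((if 0 < pvCnt d k m then pvF d p k (pvCnt d k m - 1) else 0) + p.getD m 0) := by
  obtain ⟨mm, rfl⟩ : ∃ mm, m = mm + 1 := ⟨m - 1, by omega⟩
  rw [pvF]
  simp

lemma pyGetD_zero (p : List Int) : PySem.List.pyGetD p 0 0 = p.getD 0 0 := by
  simpa using PySem.List.pyGetD_natCast p 0 0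

lemma pyGetD_neg_one (xs : List Int) (h : xs ≠ []) :
    PySem.List.pyGetD xs (-1) 0 = xs.getD (xs.length - 1) 0 := by
  have h1 : 1 ≤ xs.length := List.length_pos_iff.mpr h
  simp [PySem.List.pyGetD, PySem.List.pyGet?, PySem.List.pyIdx?, h1]

-- shape of A's dp array after processing range(1, m)
lemma A_loop (d : List Int) (p : List Int) (k : Int) (hs : d.Pairwise (· ≤ ·)) :
    ∀ m : Nat, 1 ≤ m → m ≤ d.length →
      (PySem.List.pyRange 1 (m : Int) 1).foldl (fun dp i =>
        let prev := pvFindPrev d k i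
        if prev ≠ -1 then
          dp.set i.toNat (max (PySem.List.pyGetD dp (i - 1) 0) (PySem.List.pyGetD dp prev 0 + PySem.List.pyGetD p i 0))
        else
          dp.set i.toNat (max (PySem.List.pyGetD dp (i - 1) 0) (PySem.List.pyGetD p i 0)))
        ((List.replicate d.length 0).set 0 (PySem.List.pyGetD p 0 0))
      = (List.range d.length).map (fun t => if t < m then pvF d p k t else 0) := by
  intro m hm1
  induction m, hm1 using Nat.le_induction with
  | base =>
    intro _
    rw [show ((1:Nat):Int) = 1 by norm_num, PySem.List.pyRange_one_eq_nil (le_refl 1),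
      List.foldl_nil]
    apply List.ext_getElem
    · simp
    · intro t h1 h2
      simp only [List.getElem_set, List.getElem_replicate, List.getElem_map, List.getElem_range]
      by_cases ht : (0:Nat) = t
      · rw [if_pos ht, ← ht, if_pos (show (0:Nat) < 1 by omega)]
        have h0 : pvF d p k 0 = p.getD 0 0 := by rw [pvF]
        rw [pyGetD_zero, h0]
      · rw [if_neg ht, if_neg (show ¬ t < 1 by omega)]
  | succ m hm ih =>
    intro hm2
    have hmlt : m < d.length := by omega
    have hcast : ((m + 1 : Nat) : Int) = (m : Int) + 1 := by push_cast; ring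
    rw [hcast, PySem.List.pyRange_one_succ_right (by exact_mod_cast hm), List.foldl_append,
      ih (by omega), List.foldl_cons, List.foldl_nil]
    set c := pvCnt d k m with hcdef
    have hcle : c ≤ m := pvCnt_le d k m
    have hq' := pv_hq d k hs m hmlt
    have hprev : pvFindPrev d k (m:Int) = (c:Int) - 1 := by
      unfold pvFindPrev
      exact pvFindPrev_run d k (m:Int) (c:Int) hq' ((m:Int)).toNat 0 ((m:Int) - 1)
        (by omega) (by omega) (by omega) (by omega) (by omega) (by omega)
    set L := (List.range d.length).map (fun t => if t < m then pvF d p k t else 0) with hLdef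
    have hread : ∀ t : Nat, t < m → PySem.List.pyGetD L (t:Int) 0 = pvF d p k t := by
      intro t ht
      rw [PySem.List.pyGetD_natCast, hLdef, map_range_getD (fun t => if t < m then pvF d p k t else 0) d.length t (by omega)]
      simp [ht]
    have hreadm1 : PySem.List.pyGetD L ((m:Int) - 1) 0 = pvF d p k (m - 1) := by
      rw [show (m:Int) - 1 = (((m - 1 : Nat)):Int) by omega]
      exact hread (m - 1) (by omega)
    have hreadp : PySem.List.pyGetD p (m:Int) 0 = p.getD m 0 := PySem.List.pyGetD_natCast p m 0
    have hset : L.set m (pvF d p k m)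
        = (List.range d.length).map (fun t => if t < m + 1 then pvF d p k t else 0) := by
      apply List.ext_getElem
      · simp [hLdef]
      · intro t h1 h2
        simp only [hLdef, List.getElem_set, List.getElem_map, List.getElem_range]
        by_cases htm : m = t
        · subst htm
          simp
        · simp only [if_neg htm]
          by_cases h : t < m
          · rw [if_pos h, if_pos (show t < m + 1 by omega)]
          · rw [if_neg h, if_neg (show ¬ t < m + 1 by omega)]
    have hval : pvF d p k m = max (pvF d p k (m - 1))
        ((if 0 < c then pvF d p k (c - 1) else 0) + p.getD m 0) := pvF_succ d p k m hm
    simp only [hprev]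
    by_cases hc0 : c = 0
    · rw [if_neg (show ¬ ((c:Int) - 1 ≠ -1) by omega)]
      rw [hreadm1, hreadp, show ((m:Int)).toNat = m from Int.toNat_natCast m]
      rw [show max (pvF d p k (m - 1)) (p.getD m 0) = pvF d p k m by
        rw [hval, hc0]; simp]
      exact hset
    · rw [if_pos (show ((c:Int) - 1 ≠ -1) by omega)]
      have hreadc : PySem.List.pyGetD L ((c:Int) - 1) 0 = pvF d p k (c - 1) := by
        rw [show (c:Int) - 1 = (((c - 1 : Nat)):Int) by omega]
        exact hread (c - 1) (by omega)
      rw [hreadm1, hreadc, hreadp, show ((m:Int)).toNat = m from Int.toNat_natCast m]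
      rw [show max (pvF d p k (m - 1)) (pvF d p k (c - 1) + p.getD m 0) = pvF d p k m by
        rw [hval, if_pos (show 0 < c by omega)]]
      exact hset

-- shape of B's state after processing range(1, m)
lemma B_loop (d : List Int) (p : List Int) (k : Int) (hs : d.Pairwise (· ≤ ·)) :
    ∀ m : Nat, 1 ≤ m → m ≤ d.length →
      (PySem.List.pyRange 1 (m : Int) 1).foldl
        (fun (s : Int × List Int × Int) i =>
          let j := pvAdvance d k i s.2.2
          let cand := (if j > 0 then PySem.List.pyGetD s.2.1 (j - 1) 0 else 0) + PySem.List.pyGetD p i 0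
          let best := max s.1 cand
          (best, s.2.1 ++ [best], j))
        (PySem.List.pyGetD p 0 0, [PySem.List.pyGetD p 0 0], 0)
      = (pvF d p k (m - 1), (List.range m).map (pvF d p k), ((pvCnt d k (m - 1) : Nat) : Int)) := by
  intro m hm1
  induction m, hm1 using Nat.le_induction with
  | base =>
    intro _
    rw [show ((1:Nat):Int) = 1 by norm_num, PySem.List.pyRange_one_eq_nil (le_refl 1),
      List.foldl_nil]
    have : pvF d p k 0 = p.getD 0 0 := by rw [pvF]
    simp [this, pyGetD_zero, List.range_one, pvCnt]
  | succ m hm ih =>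
    intro hm2
    have hmlt : m < d.length := by omega
    have hcast : ((m + 1 : Nat) : Int) = (m : Int) + 1 := by push_cast; ring
    rw [hcast, PySem.List.pyRange_one_succ_right (by exact_mod_cast hm), List.foldl_append,
      ih (by omega), List.foldl_cons, List.foldl_nil]
    set c := pvCnt d k m with hcdef
    have hcle : c ≤ m := pvCnt_le d k m
    have hq' := pv_hq d k hs m hmlt
    have hmono : pvCnt d k (m - 1) ≤ c := by
      have h := pvCnt_mono d k hs (m - 1) (by omega)
      rwa [Nat.sub_add_cancel hm] at h
    have hadv : pvAdvance d k (m:Int) ((pvCnt d k (m - 1) : Nat) : Int) = (c:Int) := by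
      unfold pvAdvance
      exact pvAdvance_run d k (m:Int) (c:Int) hq' (by omega) _ _
        (by omega) (by omega) (by omega)
    simp only [hadv]
    have hreadB : ∀ t : Nat, t < m →
        PySem.List.pyGetD ((List.range m).map (pvF d p k)) (t:Int) 0 = pvF d p k t := by
      intro t ht
      rw [PySem.List.pyGetD_natCast, map_range_getD (pvF d p k) m t ht]
    have hreadp : PySem.List.pyGetD p (m:Int) 0 = p.getD m 0 := PySem.List.pyGetD_natCast p m 0
    have hval : pvF d p k m = max (pvF d p k (m - 1))
        ((if 0 < c then pvF d p k (c - 1) else 0) + p.getD m 0) := pvF_succ d p k m hm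
    have hcand : (if ((c:Int)) > 0 then
          PySem.List.pyGetD ((List.range m).map (pvF d p k)) ((c:Int) - 1) 0 else 0)
        + PySem.List.pyGetD p (m:Int) 0
        = (if 0 < c then pvF d p k (c - 1) else 0) + p.getD m 0 := by
      rw [hreadp]
      by_cases hc0 : 0 < c
      · rw [if_pos (by exact_mod_cast hc0), if_pos hc0,
          show (c:Int) - 1 = (((c - 1 : Nat)):Int) by omega, hreadB (c - 1) (by omega)]
      · rw [if_neg (by omega : ¬ ((c:Int)) > 0), if_neg hc0]
    rw [hcand, ← hval]
    refine Prod.ext ?_ (Prod.ext ?_ ?_)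
    · simp
    · rw [List.range_succ, List.map_append]
      simp
    · simp [hcdef]

-- ===== VERDICT (by name: the statement is the Claim_ definition above) =====
theorem open_coffee_shops_spec : Claim_equal_open_coffee_shops := by
  intro d p k _hdom hpre
  obtain ⟨hne, _hlen, hs⟩ := hpre
  have hn : 1 ≤ d.length := List.length_pos_iff.mpr hne
  unfold Spec_open_coffee_shops
  simp only [open_coffee_shops, open_coffee_shops_alt]
  rw [A_loop d p k hs d.length hn le_rfl, B_loop d p k hs d.length hn le_rfl]
  have hmapeq : (List.range d.length).map (fun t => if t < d.length then pvF d p k t else 0)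
      = (List.range d.length).map (pvF d p k) :=
    List.map_congr_left (fun t ht => by simp [List.mem_range.mp ht])
  have hLne : (List.range d.length).map (pvF d p k) ≠ [] := by
    simp only [ne_eq, List.map_eq_nil_iff, List.range_eq_nil]
    omega
  rw [hmapeq, pyGetD_neg_one _ hLne]
  simp only [List.length_map, List.length_range]
  rw [map_range_getD (pvF d p k) d.length (d.length - 1) (by omega)]
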